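-- pv_equiv track=rewrite | github.com/rbrown-orxa/LC_App_2_microservices | api/utils.py | get_variable_fields
-- ===== SOURCE A (Python) =====
-- def get_variable_fields(schema,
--         fields=['roof_size_m2', 'azimuth_deg','pitch_deg']):
--     """
--     Retrieve the variable values form fields.
--     req: the dict-like request object passed by Flask
--     fields: list of the expected keys in req.form
--     Returns: Dictionary of {expected form fields:field values}
--     """
--     building_data=schema.get('building_data')
--     super_dict = {}
--     for d in building_data:
--         for k, v in d.items():
--             super_dict.setdefault(k, []).append(v)
--     return ( {field : super_dict.get(field, None) for field in fields} )
-- ===== SOURCE B (Python) =====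
-- def get_variable_fields(schema,
--         fields=['roof_size_m2', 'azimuth_deg', 'pitch_deg']):
--     building_data = schema.get('building_data')
--     uniq = []
--     for f in fields:
--         if f not in uniq:
--             uniq.append(f)
--     pairs = []
--     for f in uniq:
--         vals = []
--         for d in building_data:
--             if f in d:
--                 vals.append(d[f])
--         pairs.append((f, vals if vals else None))
--     return dict(pairs)
-- ===== Notes on version B (the rewrite author's own statement) =====
-- stated objective: alternative
-- what changed: B drops A's intermediate super_dict over all keys and its result-dict machinery: it dedups the requested fields first, then for each field scans the records once appending matching values to a plain list, and assembles the answer as a list of pairs; it trades one grouping pass over all items for a per-field scan.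
import Mathlib
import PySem

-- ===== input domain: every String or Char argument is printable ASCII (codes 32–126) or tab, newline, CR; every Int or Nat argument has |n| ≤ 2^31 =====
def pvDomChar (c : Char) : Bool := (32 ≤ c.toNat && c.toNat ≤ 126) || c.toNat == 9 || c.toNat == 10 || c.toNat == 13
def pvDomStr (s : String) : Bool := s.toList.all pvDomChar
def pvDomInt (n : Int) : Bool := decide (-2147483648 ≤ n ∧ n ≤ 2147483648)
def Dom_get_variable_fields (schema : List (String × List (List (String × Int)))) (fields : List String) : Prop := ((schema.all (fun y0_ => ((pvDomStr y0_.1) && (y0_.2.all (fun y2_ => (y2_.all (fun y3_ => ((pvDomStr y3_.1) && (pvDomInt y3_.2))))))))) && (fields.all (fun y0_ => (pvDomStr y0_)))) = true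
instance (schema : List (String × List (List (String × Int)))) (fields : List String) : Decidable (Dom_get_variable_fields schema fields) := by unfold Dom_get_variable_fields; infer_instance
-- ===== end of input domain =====

-- B replaces A's super_dict-over-all-keys and result-dict by: dedup the requested fields,
-- then a per-field scan of the records collecting values into a plain list of pairs
-- (objective: alternative). Equivalence of the RETURN value on inputs whose schema contains
-- the key 'building_data' (elsewhere Python A raises TypeError iterating None).

-- ===== PORT A =====
def get_variable_fields (schema : List (String × List (List (String × Int)))) (fields : List String) : List (String × Option (List Int)) :=
  match (PySem.Dict.ofList schema).get? "building_data" with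
  | none => []   -- unreachable under Pre_: Python raises TypeError here
  | some building_data =>
    -- super_dict.setdefault(k, []).append(v)  ≡  super_dict[k] = super_dict.get(k, []) + [v]
    let super_dict : PySem.Dict String (List Int) :=
      building_data.foldl
        (fun sd d => (PySem.Dict.ofList d).items.foldl
            (fun sd kv => sd.modify kv.1 [] (· ++ [kv.2])) sd)
        PySem.Dict.empty
    (fields.foldl (fun r field => r.insert field (super_dict.get? field)) PySem.Dict.empty).items

-- ===== PORT B =====
def get_variable_fields_alt (schema : List (String × List (List (String × Int)))) (fields : List String) : List (String × Option (List Int)) :=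
  match (PySem.Dict.ofList schema).get? "building_data" with
  | none => []   -- unreachable under Pre_: Python raises TypeError here
  | some building_data =>
    -- uniq: the requested fields with duplicates removed, first occurrence kept
    let uniq := fields.foldl (fun acc f => if f ∈ acc then acc else acc ++ [f]) []
    -- pairs.append((f, vals if vals else None)); dict(pairs) over distinct keys keeps the pairs as-is
    uniq.map (fun f =>
      let vals := building_data.foldl
        (fun vs d => match (PySem.Dict.ofList d).get? f with
                     | some v => vs ++ [v]
                     | none => vs) []
      (f, if vals = [] then none else some vals))

-- ===== PRECONDITION & SPEC =====
-- Pre_: Python A (and B) raise TypeError when the key 'building_data' is absent from schema.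
def Pre_get_variable_fields (schema : List (String × List (List (String × Int)))) (fields : List String) : Prop :=
  "building_data" ∈ schema.map Prod.fst
instance (schema : List (String × List (List (String × Int)))) (fields : List String) : Decidable (Pre_get_variable_fields schema fields) := by unfold Pre_get_variable_fields; infer_instance

def pvWitness_get_variable_fields : (List (String × List (List (String × Int)))) × List String :=
  ([("building_data", [[("roof_size_m2", 40), ("azimuth_deg", 180)], [("roof_size_m2", 25)]])],
   ["roof_size_m2", "pitch_deg"])

def Spec_get_variable_fields (schema : List (String × List (List (String × Int)))) (fields : List String) (out : List (String × Option (List Int))) : Prop := out = get_variable_fields_alt schema fields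
instance (schema : List (String × List (List (String × Int)))) (fields : List String) (out : List (String × Option (List Int))) : Decidable (Spec_get_variable_fields schema fields out) := by unfold Spec_get_variable_fields; infer_instance

-- ===== CLAIM (what is proved, stated in full; the proofs are below) =====
def Claim_equal_get_variable_fields : Prop := ∀ (schema : List (String × List (List (String × Int)))) (fields : List String), Dom_get_variable_fields schema fields → Pre_get_variable_fields schema fields → Spec_get_variable_fields schema fields (get_variable_fields schema fields)

-- ===== LEMMAS AND PROOFS =====

-- get? through modify (the Dict book lists only the getD forms)
theorem pv_get?_modify (d : PySem.Dict String (List Int)) (k k' : String) (f : List Int → List Int) :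
    (d.modify k [] f).get? k' = if k' = k then some (f (d.getD k [])) else d.get? k' := by
  unfold PySem.Dict.modify
  rw [PySem.Dict.get?_insert]

theorem pv_getD_modify (d : PySem.Dict String (List Int)) (k k' : String) (f : List Int → List Int) :
    (d.modify k [] f).getD k' [] = if k' = k then f (d.getD k []) else d.getD k' [] := by
  rw [PySem.Dict.getD_eq_get?_getD, pv_get?_modify]
  split_ifs <;> simp [PySem.Dict.getD_eq_get?_getD]

-- under unique keys, filtering the pairs at k is finding the pair at k
theorem pv_filter_find (l : List (String × Int)) (hn : (l.map Prod.fst).Nodup) (k : String) :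
    (l.filter (fun p => p.1 == k)).map (·.2) = ((l.find? (fun p => p.1 == k)).map (·.2)).toList := by
  induction l with
  | nil => simp
  | cons p rest ih =>
    simp only [List.map_cons, List.nodup_cons] at hn
    by_cases hk : p.1 = k
    · have hrest : rest.filter (fun p => p.1 == k) = [] := by
        rw [List.filter_eq_nil_iff]
        intro q hq hq'
        have hq1 : q.1 = k := by simpa using hq'
        exact hn.1 (by rw [hk, ← hq1]; exact List.mem_map_of_mem (f := Prod.fst) hq)
      simp [hk, hrest]
    · simp [hk, ih hn.2]

-- one record's inner loop, seen through get?
theorem pv_inner (l : List (String × Int)) (sd : PySem.Dict String (List Int)) (k : String) :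
    (l.foldl (fun s p => s.modify p.1 [] (· ++ [p.2])) sd).get? k =
      match (l.filter (fun p => p.1 == k)).map (·.2) with
      | [] => sd.get? k
      | vs => some (sd.getD k [] ++ vs) := by
  induction l generalizing sd with
  | nil => simp
  | cons p rest ih =>
    rw [List.foldl_cons, ih]
    by_cases hk : p.1 = k
    · subst hk
      cases h : (rest.filter (fun q => q.1 == p.1)).map (·.2) with
      | nil => simp [h, pv_get?_modify]
      | cons v vs => simp [h]
    · have h1 : Ne k p.1 := fun h => hk h.symm
      cases h : (rest.filter (fun q => q.1 == k)).map (·.2) with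
      | nil => simp [h, pv_get?_modify, hk, h1]
      | cons v vs => simp [h, pv_getD_modify, hk, h1]

-- one record's inner loop over a dict's items, through get? of that dict
theorem pv_record (d : List (String × Int)) (sd : PySem.Dict String (List Int)) (k : String) :
    ((PySem.Dict.ofList d).items.foldl (fun s p => s.modify p.1 [] (· ++ [p.2])) sd).get? k =
      match (PySem.Dict.ofList d).get? k with
      | none => sd.get? k
      | some v => some (sd.getD k [] ++ [v]) := by
  rw [pv_inner,
    pv_filter_find _ (by simpa [PySem.Dict.keys] using PySem.Dict.nodup_keys_ofList d) k]
  cases h : (PySem.Dict.ofList d).items.find? (fun p => p.1 == k) with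
  | none => simp [PySem.Dict.get?, h]
  | some p => simp [PySem.Dict.get?, h]

-- A's grouping fold over all records, seen through get?
theorem pv_main (bd : List (List (String × Int))) (sd : PySem.Dict String (List Int)) (k : String) :
    (bd.foldl
        (fun sd d => (PySem.Dict.ofList d).items.foldl
            (fun sd kv => sd.modify kv.1 [] (· ++ [kv.2])) sd)
        sd).get? k =
      match bd.filterMap (fun d => (PySem.Dict.ofList d).get? k) with
      | [] => sd.get? k
      | vs => some (sd.getD k [] ++ vs) := by
  induction bd generalizing sd with
  | nil => simp
  | cons d rest ih =>
    rw [List.foldl_cons, ih]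
    cases hd : (PySem.Dict.ofList d).get? k with
    | none =>
      have h1 := pv_record d sd k
      have h2 : ((PySem.Dict.ofList d).items.foldl
          (fun s p => s.modify p.1 [] (· ++ [p.2])) sd).getD k [] = sd.getD k [] := by
        rw [PySem.Dict.getD_eq_get?_getD, h1, hd, ← PySem.Dict.getD_eq_get?_getD]
      rw [hd] at h1
      simp only [List.filterMap_cons, hd, h1, h2]
    | some v =>
      have h1 := pv_record d sd k
      have h2 : ((PySem.Dict.ofList d).items.foldl
          (fun s p => s.modify p.1 [] (· ++ [p.2])) sd).getD k [] = sd.getD k [] ++ [v] := by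
        rw [PySem.Dict.getD_eq_get?_getD, h1, hd]
        rfl
      rw [hd] at h1
      cases h : rest.filterMap (fun d => (PySem.Dict.ofList d).get? k) with
      | nil => simp [hd, h, h1]
      | cons w vs => simp [hd, h, h2]

-- per field, A's super_dict lookup as the option of the direct collection
theorem pv_field (bd : List (List (String × Int))) (k : String) :
    (bd.foldl
        (fun sd d => (PySem.Dict.ofList d).items.foldl
            (fun sd kv => sd.modify kv.1 [] (· ++ [kv.2])) sd)
        PySem.Dict.empty).get? k =
      (if bd.filterMap (fun d => (PySem.Dict.ofList d).get? k) = [] then none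
       else some (bd.filterMap (fun d => (PySem.Dict.ofList d).get? k))) := by
  rw [pv_main]
  cases h : bd.filterMap (fun d => (PySem.Dict.ofList d).get? k) with
  | nil => simp [PySem.Dict.get?_empty]
  | cons v vs => simp [PySem.Dict.getD_empty]

-- B's value-collecting loop is a filterMap
theorem pv_collect (bd : List (List (String × Int))) (f : String) (acc : List Int) :
    bd.foldl (fun vs d => match (PySem.Dict.ofList d).get? f with
                          | some v => vs ++ [v]
                          | none => vs) acc
      = acc ++ bd.filterMap (fun d => (PySem.Dict.ofList d).get? f) := by
  induction bd generalizing acc with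
  | nil => simp
  | cons d rest ih =>
    rw [List.foldl_cons, List.filterMap_cons]
    cases h : (PySem.Dict.ofList d).get? f with
    | none => simp only [ih]
    | some v => simp only [ih, List.append_assoc, List.singleton_append]

-- A's result dict, built by inserting a value depending only on the key, lists the deduped keys
theorem pv_fold_insert (v : String → Option (List Int)) (fs : List String) :
    ∀ (u : List String) (d : PySem.Dict String (Option (List Int))),
      d.items = u.map (fun f => (f, v f)) → u.Nodup →
      (fs.foldl (fun r f => r.insert f (v f)) d).items
        = (fs.foldl (fun acc f => if f ∈ acc then acc else acc ++ [f]) u).map (fun f => (f, v f)) := by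
  induction fs with
  | nil => intro u d hd _; simpa using hd
  | cons f fs ih =>
    intro u d hd hu
    have hkeys : d.keys = u := by
      simp [PySem.Dict.keys, hd, List.map_map, Function.comp_def]
    have hcont : d.contains f = decide (f ∈ u) := by
      rw [PySem.Dict.contains_eq_decide_mem_keys, hkeys]
    rw [List.foldl_cons, List.foldl_cons]
    by_cases hf : f ∈ u
    · have hc : d.contains f = true := by simp [hcont, hf]
      have hitems : (d.insert f (v f)).items = u.map (fun g => (g, v g)) := by
        rw [PySem.Dict.items_insert_of_contains d _ hc, hd, List.map_map]
        refine List.map_congr_left (fun x _ => ?_)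
        by_cases hx : x = f <;> simp [hx]
      rw [if_pos hf]
      exact ih u _ hitems hu
    · have hc : d.contains f = false := by simp [hcont, hf]
      have hitems : (d.insert f (v f)).items = (u ++ [f]).map (fun g => (g, v g)) := by
        rw [PySem.Dict.items_insert_of_not_contains d _ hc, hd]
        simp
      rw [if_neg hf]
      have hnf : ∀ a ∈ u, a ≠ f := fun a ha h => hf (h ▸ ha)
      exact ih (u ++ [f]) _ hitems (by simp [List.nodup_append, hu]; exact hnf)

-- ===== VERDICT (by name: the statement is the Claim_ definition above) =====
theorem get_variable_fields_spec : Claim_equal_get_variable_fields := by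
  intro schema fields _ _
  unfold Spec_get_variable_fields get_variable_fields get_variable_fields_alt
  cases h : (PySem.Dict.ofList schema).get? "building_data" with
  | none => rfl
  | some bd =>
    dsimp only
    rw [pv_fold_insert _ fields [] PySem.Dict.empty (by rfl) List.nodup_nil]
    refine List.map_congr_left (fun f _ => ?_)
    rw [pv_field, pv_collect]
    simp
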